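-- pv_equiv track=rewrite | github.com/hernan-alperin/segmentacion | segMaker.py | segMaker
-- ===== SOURCE A (Python) =====
-- def segMaker(seq,n,m):
--     if sum(seq) < n:        # too short
--         return None         # base case returns not segmentable
--     if n <= sum(seq) <= m:  # right size
--         return [sum(seq)]   # base case returns the segment length
--     else:
--         i, s, heads = 0, 0, []              # init variables
--         # crear una lista de ramas ya exploradas
--         while i < len(seq) and s < n:       # get upto sgm len lower bound
--             i, s = i+1, s+seq[i]
--         while i < len(seq) and n <= s <= m: # while feasible
--             # chequear que el candidato no haya sido ya explorado
--             heads.append((i, [s]))          # add candidates to explore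
--             i, s = i+1, s+seq[i]
--         # call a function to sort heads with heuristic
--         while heads:
--             i, candidate = heads.pop()
--             tail = seq[i:]
--             sgms = segMaker(tail,n,m)
--             if sgms:
--                 candidate.extend(sgms)
--                 return candidate
-- ===== SOURCE B (Python) =====
-- def segMaker(seq, n, m):
--     L = len(seq)
--     pref = [0] * (L + 1)
--     for k in range(L):
--         pref[k + 1] = pref[k] + seq[k]
--     total = pref[L]
--     dp = [None] * (L + 1)
--     for j in range(L, -1, -1):
--         t = total - pref[j]
--         if t < n:
--             continue
--         if n <= t <= m:
--             dp[j] = [t]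
--             continue
--         i = j
--         while i < L and pref[i] - pref[j] < n:
--             i += 1
--         lo = i
--         while i < L and n <= pref[i] - pref[j] <= m:
--             i += 1
--         res = None
--         for c in range(i - 1, lo - 1, -1):
--             sub = dp[c]
--             if sub:
--                 res = [pref[c] - pref[j]] + sub
--                 break
--         dp[j] = res
--     return dp[0]
-- ===== Notes on version B (the rewrite author's own statement) =====
-- stated objective: alternative
-- what changed: A's recursive backtracking over suffixes (re-summing the list at every call) is replaced by an iterative bottom-up DP over suffix start indices with precomputed prefix sums, solving each suffix at most once.
-- outside the precondition, e.g. on segMaker([2, 3], 0, 3): A returns [2, 3], B returns [2, 3]; on segMaker([1], 0, 0): A raises RecursionError, B returns None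
import Mathlib
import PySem

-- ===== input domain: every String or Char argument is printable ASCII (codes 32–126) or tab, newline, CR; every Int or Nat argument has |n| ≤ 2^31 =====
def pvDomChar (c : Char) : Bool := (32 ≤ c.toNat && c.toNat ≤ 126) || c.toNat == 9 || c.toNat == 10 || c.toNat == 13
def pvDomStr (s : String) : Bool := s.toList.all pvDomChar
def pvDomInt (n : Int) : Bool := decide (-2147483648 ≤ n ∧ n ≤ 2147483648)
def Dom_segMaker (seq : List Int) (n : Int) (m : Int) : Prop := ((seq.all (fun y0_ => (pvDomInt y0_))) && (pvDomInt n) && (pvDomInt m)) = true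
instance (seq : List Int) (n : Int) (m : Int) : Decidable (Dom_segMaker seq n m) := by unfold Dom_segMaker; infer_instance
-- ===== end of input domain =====

-- B replaces A's recursive backtracking over suffixes by an iterative bottom-up
-- DP over suffix start indices with precomputed prefix sums, solving each suffix
-- at most once (objective: alternative).

-- ===== PORT A =====
-- first while loop: advance i,s while i < len(seq) ∧ s < n (rest = seq[i:])
def segLoop1 : List Int → Nat → Int → Int → Nat × Int × List Int
  | [], i, s, _ => (i, s, [])
  | x :: rest, i, s, n =>
    if s < n then segLoop1 rest (i+1) (s+x) n else (i, s, x :: rest)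

-- second while loop: collect heads (i,[s]) while i < len(seq) ∧ n ≤ s ≤ m
def segLoop2 : List Int → Nat → Int → Int → Int → List (Nat × List Int)
  | [], _, _, _, _ => []
  | x :: rest, i, s, n, m =>
    if n ≤ s ∧ s ≤ m then (i, [s]) :: segLoop2 rest (i+1) (s+x) n m
    else []

-- third while loop: pop candidates from the end (we iterate the reversed heads
-- list), recurse on the tail seq[i:], return on first truthy result
def segPop (rec : List Int → Option (List Int)) (seq : List Int) :
    List (Nat × List Int) → Option (List Int)
  | [] => none
  | (i, cand) :: hs =>
    match rec (seq.drop i) with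
    | some (x :: xs) => some (cand ++ x :: xs)   -- candidate.extend(sgms); return
    | _ => segPop rec seq hs                     -- None or [] is falsy: keep popping

-- fuel makes A's (possibly non-terminating) recursion a total Lean function;
-- seq.length + 1 fuel is exact on Pre_ (each recursive call strictly shortens seq)
def segAux : Nat → List Int → Int → Int → Option (List Int)
  | 0, _, _, _ => none
  | fuel+1, seq, n, m =>
    if seq.sum < n then none
    else if n ≤ seq.sum ∧ seq.sum ≤ m then some [seq.sum]
    else
      match segLoop1 seq 0 0 n with
      | (i, s, rest) =>
        segPop (fun t => segAux fuel t n m) seq ((segLoop2 rest i s n m).reverse)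

def segMaker (seq : List Int) (n : Int) (m : Int) : Option (List Int) :=
  segAux (seq.length + 1) seq n m

-- ===== PORT B =====
-- pref = [0, a0, a0+a1, ...] (the Python loop building the prefix-sum list)
def buildPref : List Int → Int → List Int
  | [], p => [p]
  | x :: rest, p => p :: buildPref rest (p + x)

-- while i < L and pref[i] - base < n: i += 1   (k = L - i counts the loop down)
def winLoAux (pref : List Int) (base n : Int) : Nat → Nat → Nat
  | 0, i => i
  | k+1, i => if pref.getD i 0 - base < n then winLoAux pref base n k (i+1) else i
def winLo (pref : List Int) (base n : Int) (L : Nat) (i : Nat) : Nat :=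
  winLoAux pref base n (L - i) i

-- while i < L and n <= pref[i] - base <= m: i += 1
def winHiAux (pref : List Int) (base n m : Int) : Nat → Nat → Nat
  | 0, i => i
  | k+1, i => if n ≤ pref.getD i 0 - base ∧ pref.getD i 0 - base ≤ m then winHiAux pref base n m k (i+1) else i
def winHi (pref : List Int) (base n m : Int) (L : Nat) (i : Nat) : Nat :=
  winHiAux pref base n m (L - i) i

-- for c in range(hi-1, lo-1, -1): if dp[c]: res = [pref[c]-base] + dp[c]; break
def tryCands (dp : List (Option (List Int))) (pref : List Int) (base : Int) :
    List Nat → Option (List Int)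
  | [] => none
  | c :: cs =>
    match dp.getD c none with
    | some (x :: xs) => some ((pref.getD c 0 - base) :: x :: xs)
    | _ => tryCands dp pref base cs

-- one iteration of the j-loop (dp[j] is already None, so the `continue` of the
-- first branch leaves dp unchanged, exactly like the Python)
def dpStep (pref : List Int) (total n m : Int) (L : Nat)
    (dp : List (Option (List Int))) (j : Nat) : List (Option (List Int)) :=
  if total - pref.getD j 0 < n then dp
  else if n ≤ total - pref.getD j 0 ∧ total - pref.getD j 0 ≤ m then
    dp.set j (some [total - pref.getD j 0])
  else
    dp.set j (tryCands dp pref (pref.getD j 0)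
      ((List.range' (winLo pref (pref.getD j 0) n L j)
         (winHi pref (pref.getD j 0) n m L (winLo pref (pref.getD j 0) n L j)
           - winLo pref (pref.getD j 0) n L j)).reverse))

def segMaker_alt (seq : List Int) (n : Int) (m : Int) : Option (List Int) :=
  let L := seq.length
  let pref := buildPref seq 0
  let total := pref.getD L 0
  let dp := ((List.range (L+1)).reverse).foldl (dpStep pref total n m L)
              (List.replicate (L+1) none)
  dp.getD 0 none

-- ===== PRECONDITION & SPEC =====
-- Pre_ excludes the whole region n ≤ 0 ≤ m < sum(seq): there the zero-advance cut
-- candidate makes A recurse on the UNSHORTENED list, so on part of this region A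
-- dies with RecursionError (e.g. seq=[1], n=0, m=0), while on the rest A happens
-- to return before reaching that candidate; the crashing subset has no closed
-- form, so the region is excluded as a whole — on its returning part B computes
-- the SAME value as A anyway (e.g. seq=[2,3], n=0, m=3: both return [2,3]).
def Pre_segMaker (seq : List Int) (n : Int) (m : Int) : Prop :=
  ¬ (n ≤ 0 ∧ 0 ≤ m ∧ m < seq.sum)
instance (seq : List Int) (n : Int) (m : Int) : Decidable (Pre_segMaker seq n m) := by
  unfold Pre_segMaker; infer_instance

def pvWitness_segMaker : List Int × Int × Int := ([2, 1, 2], 2, 3)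

def Spec_segMaker (seq : List Int) (n : Int) (m : Int) (out : Option (List Int)) : Prop := out = segMaker_alt seq n m
instance (seq : List Int) (n : Int) (m : Int) (out : Option (List Int)) : Decidable (Spec_segMaker seq n m out) := by unfold Spec_segMaker; infer_instance

-- ===== CLAIM (what is proved, stated in full; the proofs are below) =====
def Claim_equal_segMaker : Prop := ∀ (seq : List Int) (n : Int) (m : Int), Dom_segMaker seq n m → Pre_segMaker seq n m → Spec_segMaker seq n m (segMaker seq n m)

-- ===== LEMMAS AND PROOFS =====

-- prefix-sum abbreviation used only by the proofs
def PS (seq : List Int) (j : Nat) : Int := (seq.take j).sum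

theorem buildPref_getD (seq : List Int) (p : Int) (k : Nat) (hk : k ≤ seq.length) :
    (buildPref seq p).getD k 0 = p + (seq.take k).sum := by
  induction seq generalizing p k with
  | nil =>
    have : k = 0 := by simpa using hk
    subst this; simp [buildPref]
  | cons x rest ih =>
    cases k with
    | zero => simp [buildPref]
    | succ k =>
      simp only [buildPref, List.getD_cons_succ, List.take_succ_cons, List.sum_cons]
      rw [ih (p + x) k (by simpa using hk)]
      ring

theorem pref_getD (seq : List Int) (k : Nat) (hk : k ≤ seq.length) :
    (buildPref seq 0).getD k 0 = PS seq k := by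
  simpa [PS] using buildPref_getD seq 0 k hk

theorem getD_set_self (dp : List (Option (List Int))) (j : Nat) (v : Option (List Int))
    (h : j < dp.length) : (dp.set j v).getD j none = v := by
  simp [List.getD_eq_getElem?_getD, h]

theorem getD_set_ne (dp : List (Option (List Int))) (j c : Nat) (v : Option (List Int))
    (h : j ≠ c) : (dp.set j v).getD c none = dp.getD c none := by
  simp [List.getD_eq_getElem?_getD, List.getElem?_set_ne h]

theorem getD_replicate (k c : Nat) : (List.replicate k (none : Option (List Int))).getD c none = none := by
  simp [List.getD_eq_getElem?_getD, List.getElem?_replicate]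
  split <;> simp

-- ---- window-loop characterisations ----

theorem winLoAux_bds (pref : List Int) (base n : Int) (k i : Nat) :
    i ≤ winLoAux pref base n k i ∧ winLoAux pref base n k i ≤ i + k := by
  induction k generalizing i with
  | zero => simp [winLoAux]
  | succ k ih =>
    simp only [winLoAux]
    split
    · have := ih (i+1); omega
    · omega

theorem winHiAux_bds (pref : List Int) (base n m : Int) (k i : Nat) :
    i ≤ winHiAux pref base n m k i ∧ winHiAux pref base n m k i ≤ i + k := by
  induction k generalizing i with
  | zero => simp [winHiAux]
  | succ k ih =>
    simp only [winHiAux]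
    split
    · have := ih (i+1); omega
    · omega

theorem winLo_ge (pref : List Int) (base n : Int) (L i : Nat) : i ≤ winLo pref base n L i :=
  (winLoAux_bds pref base n (L - i) i).1

theorem winLo_le (pref : List Int) (base n : Int) (L i : Nat) (h : i ≤ L) :
    winLo pref base n L i ≤ L := by
  have := (winLoAux_bds pref base n (L - i) i).2
  unfold winLo; omega

theorem winHi_ge (pref : List Int) (base n m : Int) (L i : Nat) : i ≤ winHi pref base n m L i :=
  (winHiAux_bds pref base n m (L - i) i).1

theorem winHi_le (pref : List Int) (base n m : Int) (L i : Nat) (h : i ≤ L) :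
    winHi pref base n m L i ≤ L := by
  have := (winHiAux_bds pref base n m (L - i) i).2
  unfold winHi; omega

theorem winLo_stop (pref : List Int) (base n : Int) (L i : Nat) (h : L ≤ i) :
    winLo pref base n L i = i := by
  unfold winLo
  have : L - i = 0 := by omega
  rw [this]; rfl

theorem winLo_step (pref : List Int) (base n : Int) (L i : Nat) (h : i < L) :
    winLo pref base n L i =
      if pref.getD i 0 - base < n then winLo pref base n L (i+1) else i := by
  unfold winLo
  have h1 : L - i = (L - (i+1)) + 1 := by omega
  rw [h1]; rfl

theorem winHi_stop (pref : List Int) (base n m : Int) (L i : Nat) (h : L ≤ i) :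
    winHi pref base n m L i = i := by
  unfold winHi
  have : L - i = 0 := by omega
  rw [this]; rfl

theorem winHi_step (pref : List Int) (base n m : Int) (L i : Nat) (h : i < L) :
    winHi pref base n m L i =
      if n ≤ pref.getD i 0 - base ∧ pref.getD i 0 - base ≤ m then winHi pref base n m L (i+1) else i := by
  unfold winHi
  have h1 : L - i = (L - (i+1)) + 1 := by omega
  rw [h1]; rfl

-- ---- A's first loop ↔ winLo ----

theorem loop1_eq_winLo (seq : List Int) (n : Int) (j : Nat) (u : List Int) (r : Nat)
    (hjr : j + r ≤ seq.length) (hu : seq.drop (j + r) = u) :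
    segLoop1 u r (PS seq (j+r) - PS seq j) n =
      (winLo (buildPref seq 0) (PS seq j) n seq.length (j+r) - j,
       PS seq (winLo (buildPref seq 0) (PS seq j) n seq.length (j+r)) - PS seq j,
       seq.drop (winLo (buildPref seq 0) (PS seq j) n seq.length (j+r))) := by
  induction u generalizing r with
  | nil =>
    have hL : j + r = seq.length := by
      have := congrArg List.length hu; simp at this; omega
    rw [winLo_stop _ _ _ _ _ (le_of_eq hL.symm)]
    simp [segLoop1, hu]
  | cons x u' ih =>
    have hlt : j + r < seq.length := by
      have := congrArg List.length hu; simp at this; omega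
    have hcons : seq.drop (j+r) = seq[j+r] :: seq.drop (j+r+1) := List.drop_eq_getElem_cons hlt
    rw [hu] at hcons
    have hx : x = seq[j+r] := (List.cons_eq_cons.1 hcons).1
    have hu' : seq.drop (j+r+1) = u' := ((List.cons_eq_cons.1 hcons).2).symm
    rw [winLo_step _ _ _ _ _ hlt, pref_getD seq (j+r) (le_of_lt hlt)]
    by_cases hc : PS seq (j+r) - PS seq j < n
    · rw [if_pos hc]
      have hsum : PS seq (j+r) - PS seq j + x = PS seq (j+(r+1)) - PS seq j := by
        rw [hx]; unfold PS
        rw [show j+(r+1) = (j+r)+1 by omega, List.sum_take_succ seq (j+r) hlt]; ring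
      simpa [segLoop1, hc, hsum] using ih (r+1) (by omega) hu'
    · rw [if_neg hc]
      simp [segLoop1, hc, hu.symm]

-- ---- A's second loop ↔ winHi ----

theorem loop2_eq_winHi (seq : List Int) (n m : Int) (j : Nat) (u : List Int) (r : Nat)
    (hjr : j + r ≤ seq.length) (hu : seq.drop (j + r) = u) :
    segLoop2 u r (PS seq (j+r) - PS seq j) n m =
      (List.range' (j+r) (winHi (buildPref seq 0) (PS seq j) n m seq.length (j+r) - (j+r))).map
        (fun c => (c - j, [PS seq c - PS seq j])) := by
  induction u generalizing r with
  | nil =>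
    have hL : j + r = seq.length := by
      have := congrArg List.length hu; simp at this; omega
    rw [winHi_stop _ _ _ _ _ _ (le_of_eq hL.symm)]
    simp [segLoop2]
  | cons x u' ih =>
    have hlt : j + r < seq.length := by
      have := congrArg List.length hu; simp at this; omega
    have hcons : seq.drop (j+r) = seq[j+r] :: seq.drop (j+r+1) := List.drop_eq_getElem_cons hlt
    rw [hu] at hcons
    have hx : x = seq[j+r] := (List.cons_eq_cons.1 hcons).1
    have hu' : seq.drop (j+r+1) = u' := ((List.cons_eq_cons.1 hcons).2).symm
    rw [winHi_step _ _ _ _ _ _ hlt, pref_getD seq (j+r) (le_of_lt hlt)]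
    by_cases hc : n ≤ PS seq (j+r) - PS seq j ∧ PS seq (j+r) - PS seq j ≤ m
    · rw [if_pos hc]
      have hsum : PS seq (j+r) - PS seq j + x = PS seq (j+r+1) - PS seq j := by
        rw [hx]; unfold PS
        rw [List.sum_take_succ seq (j+r) hlt]; ring
      have hge : j + r + 1 ≤ winHi (buildPref seq 0) (PS seq j) n m seq.length (j+r+1) :=
        winHi_ge _ _ _ _ _ _
      have hcount : winHi (buildPref seq 0) (PS seq j) n m seq.length (j+r+1) - (j+r)
          = (winHi (buildPref seq 0) (PS seq j) n m seq.length (j+r+1) - (j+r+1)) + 1 := by omega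
      simp only [segLoop2, hc, and_self, if_true, hsum]
      rw [hcount, List.range'_succ, List.map_cons, Nat.add_sub_cancel_left]
      exact congrArg _ (ih (r+1) (by omega) hu')
    · rw [if_neg hc]
      simp only [segLoop2, if_neg hc]
      simp

-- ---- A's third loop ↔ the candidate scan over dp ----

theorem pop_eq_tryCands (seq : List Int) (n m : Int) (j : Nat)
    (dp : List (Option (List Int))) (f : Nat) (cs : List Nat)
    (hcs : ∀ c ∈ cs, j ≤ c ∧ c ≤ seq.length ∧
        dp.getD c none = segAux f (seq.drop c) n m) :
    segPop (fun t => segAux f t n m) (seq.drop j)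
        (cs.map (fun c => (c - j, [PS seq c - PS seq j]))) =
      tryCands dp (buildPref seq 0) (PS seq j) cs := by
  induction cs with
  | nil => simp [segPop, tryCands]
  | cons c cs ih =>
    obtain ⟨h1, h2, h3⟩ := hcs c (by simp)
    simp only [List.map_cons, segPop, tryCands]
    rw [show (seq.drop j).drop (c - j) = seq.drop c by
      rw [List.drop_drop]; congr 1; omega]
    rw [← h3, pref_getD seq c h2]
    have ihx := ih (fun d hd => hcs d (by simp [hd]))
    cases hv : dp.getD c none with
    | none => simpa [hv] using ihx
    | some l =>
      cases l with
      | nil => simpa [hv] using ihx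
      | cons x xs => simp

-- ---- lower bounds on A's loop positions (needed for fuel irrelevance) ----

theorem segLoop1_ge (seq : List Int) (i : Nat) (s n : Int) : i ≤ (segLoop1 seq i s n).1 := by
  induction seq generalizing i s with
  | nil => simp [segLoop1]
  | cons x rest ih =>
    simp only [segLoop1]
    split
    · exact le_trans (by omega) (ih (i+1) (s+x))
    · simp

theorem segLoop1_pos (seq : List Int) (n : Int) (hn : 1 ≤ n) (hne : seq ≠ []) :
    1 ≤ (segLoop1 seq 0 0 n).1 := by
  cases seq with
  | nil => simp at hne
  | cons x rest =>
    simp only [segLoop1, if_pos (by omega : (0:Int) < n)]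
    simpa using segLoop1_ge rest 1 (0+x) n

theorem segLoop2_mem_ge (rest : List Int) (i : Nat) (s n m : Int) (p : Nat × List Int)
    (hp : p ∈ segLoop2 rest i s n m) : i ≤ p.1 := by
  induction rest generalizing i s with
  | nil => simp [segLoop2] at hp
  | cons x r ih =>
    simp only [segLoop2] at hp
    split at hp
    · rcases List.mem_cons.1 hp with h | h
      · subst h; simp
      · exact le_trans (by omega) (ih (i+1) (s+x) h)
    · simp at hp

theorem segPop_congr (rec1 rec2 : List Int → Option (List Int)) (seq : List Int)
    (hs : List (Nat × List Int))
    (hrec : ∀ p ∈ hs, rec1 (seq.drop p.1) = rec2 (seq.drop p.1)) :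
    segPop rec1 seq hs = segPop rec2 seq hs := by
  induction hs with
  | nil => rfl
  | cons p hs ih =>
    obtain ⟨i, cand⟩ := p
    have h1 := hrec (i, cand) (by simp)
    simp only [segPop, h1]
    split
    · rfl
    · exact ih (fun q hq => hrec q (by simp [hq]))

-- ---- fuel irrelevance of the A port (for n ≥ 1 any fuel ≥ length + 1 agrees) ----

theorem segAux_fuel (n m : Int) (hn : 1 ≤ n) :
    ∀ (k : Nat) (seq : List Int), seq.length ≤ k →
    ∀ f1 f2, seq.length + 1 ≤ f1 → seq.length + 1 ≤ f2 →
      segAux f1 seq n m = segAux f2 seq n m := by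
  intro k
  induction k with
  | zero =>
    intro seq hlen f1 f2 h1 h2
    have : seq = [] := List.length_eq_zero_iff.1 (by omega)
    subst this
    obtain ⟨a, rfl⟩ : ∃ a, f1 = a + 1 := ⟨f1 - 1, by omega⟩
    obtain ⟨b, rfl⟩ : ∃ b, f2 = b + 1 := ⟨f2 - 1, by omega⟩
    simp only [segAux]
    rw [if_pos (by simp; omega), if_pos (by simp; omega)]
  | succ k ih =>
    intro seq hlen f1 f2 h1 h2
    obtain ⟨a, rfl⟩ : ∃ a, f1 = a + 1 := ⟨f1 - 1, by omega⟩
    obtain ⟨b, rfl⟩ : ∃ b, f2 = b + 1 := ⟨f2 - 1, by omega⟩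
    simp only [segAux]
    by_cases hs1 : seq.sum < n
    · rw [if_pos hs1, if_pos hs1]
    rw [if_neg hs1, if_neg hs1]
    by_cases hs2 : n ≤ seq.sum ∧ seq.sum ≤ m
    · rw [if_pos hs2, if_pos hs2]
    rw [if_neg hs2, if_neg hs2]
    have hne : seq ≠ [] := by
      intro h; subst h; simp at hs1; omega
    have hi1 : 1 ≤ (segLoop1 seq 0 0 n).1 := segLoop1_pos seq n hn hne
    rcases hres : segLoop1 seq 0 0 n with ⟨i, s, rest⟩
    rw [hres] at hi1
    simp only at hi1
    apply segPop_congr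
    intro p hp
    have hp1 : i ≤ p.1 := segLoop2_mem_ge rest i s n m p (List.mem_reverse.1 hp)
    have hdl : (seq.drop p.1).length = seq.length - p.1 := by simp
    have hlen1 : 1 ≤ seq.length := List.length_pos_iff.2 hne
    exact ih (seq.drop p.1) (by simp only [List.length_drop]; omega) a b
      (by simp only [List.length_drop]; omega) (by simp only [List.length_drop]; omega)

-- ---- the DP fold, one step at a time ----

def dpG (seq : List Int) (n m : Int) (j : Nat) : List (Option (List Int)) :=
  ((List.range' j (seq.length + 1 - j)).reverse).foldl
    (dpStep (buildPref seq 0) ((buildPref seq 0).getD seq.length 0) n m seq.length)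
    (List.replicate (seq.length + 1) none)

theorem dpG_high (seq : List Int) (n m : Int) (j : Nat) (hj : seq.length + 1 ≤ j) :
    dpG seq n m j = List.replicate (seq.length + 1) none := by
  unfold dpG
  have : seq.length + 1 - j = 0 := by omega
  rw [this]; rfl

theorem dpG_step (seq : List Int) (n m : Int) (j : Nat) (hj : j ≤ seq.length) :
    dpG seq n m j =
      dpStep (buildPref seq 0) ((buildPref seq 0).getD seq.length 0) n m seq.length
        (dpG seq n m (j+1)) j := by
  unfold dpG
  have h1 : seq.length + 1 - j = (seq.length - j) + 1 := by omega
  have h2 : seq.length + 1 - (j+1) = seq.length - j := by omega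
  rw [h1, h2, List.range'_succ, List.reverse_cons, List.foldl_append]
  rfl

theorem segMaker_alt_eq_dpG (seq : List Int) (n m : Int) :
    segMaker_alt seq n m = (dpG seq n m 0).getD 0 none := by
  simp only [segMaker_alt, dpG, List.range_eq_range', Nat.sub_zero]

theorem dpStep_length (pref : List Int) (total n m : Int) (L : Nat)
    (dp : List (Option (List Int))) (j : Nat) :
    (dpStep pref total n m L dp j).length = dp.length := by
  unfold dpStep
  split_ifs <;> simp

theorem dpG_length (seq : List Int) (n m : Int) :
    ∀ k j, seq.length + 1 - j ≤ k → (dpG seq n m j).length = seq.length + 1 := by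
  intro k
  induction k with
  | zero =>
    intro j hj
    rw [dpG_high seq n m j (by omega)]; simp
  | succ k ih =>
    intro j hj
    by_cases h : j ≤ seq.length
    · rw [dpG_step seq n m j h, dpStep_length]
      exact ih (j+1) (by omega)
    · rw [dpG_high seq n m j (by omega)]; simp

theorem dpG_lo (seq : List Int) (n m : Int) :
    ∀ k j c, seq.length + 1 - j ≤ k → c < j → (dpG seq n m j).getD c none = none := by
  intro k
  induction k with
  | zero =>
    intro j c hj hc
    rw [dpG_high seq n m j (by omega)]
    exact getD_replicate _ _
  | succ k ih =>
    intro j c hj hc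
    by_cases h : j ≤ seq.length
    · rw [dpG_step seq n m j h]
      unfold dpStep
      split_ifs
      · exact ih (j+1) c (by omega) (by omega)
      · rw [getD_set_ne _ _ _ _ (by omega)]
        exact ih (j+1) c (by omega) (by omega)
      · rw [getD_set_ne _ _ _ _ (by omega)]
        exact ih (j+1) c (by omega) (by omega)
    · rw [dpG_high seq n m j (by omega)]
      exact getD_replicate _ _

-- ---- the main invariant: each dp slot holds A's value for that suffix ----

theorem dpG_inv (seq : List Int) (n m : Int) (hn : 1 ≤ n) :
    ∀ k j, seq.length + 1 - j ≤ k → ∀ c, j ≤ c → c ≤ seq.length →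
      (dpG seq n m j).getD c none = segAux (seq.length - c + 1) (seq.drop c) n m := by
  intro k
  induction k with
  | zero => intro j hj c hc1 hc2; omega
  | succ k ih =>
    intro j hj c hc1 hc2
    have hjL : j ≤ seq.length := le_trans hc1 hc2
    rw [dpG_step seq n m j hjL]
    by_cases hcj : c = j
    case neg =>
      have hne : j ≠ c := fun h => hcj h.symm
      have step : (dpStep (buildPref seq 0) ((buildPref seq 0).getD seq.length 0) n m
            seq.length (dpG seq n m (j+1)) j).getD c none
          = (dpG seq n m (j+1)).getD c none := by
        unfold dpStep
        split_ifs
        · rfl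
        · exact getD_set_ne _ _ _ _ hne
        · exact getD_set_ne _ _ _ _ hne
      rw [step]
      exact ih (j+1) (by omega) c (by omega) hc2
    case pos =>
      subst hcj
      have hbase : (buildPref seq 0).getD c 0 = PS seq c := pref_getD seq c hc2
      have htot : (buildPref seq 0).getD seq.length 0 = seq.sum := by
        rw [pref_getD seq seq.length le_rfl]; simp [PS]
      have ht : seq.sum - PS seq c = (seq.drop c).sum := by
        have h := List.sum_take_add_sum_drop seq c
        unfold PS; omega
      have hLdp : (dpG seq n m (c+1)).length = seq.length + 1 :=
        dpG_length seq n m (seq.length + 1) (c+1) (by omega)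
      have hfc : seq.length - c + 1 = (seq.length - c) + 1 := rfl
      unfold dpStep
      simp only [hbase, htot, ht]
      by_cases hb1 : (seq.drop c).sum < n
      · rw [if_pos hb1]
        rw [dpG_lo seq n m (seq.length + 1) (c+1) c (by omega) (by omega)]
        rw [hfc]
        simp only [segAux]
        rw [if_pos hb1]
      rw [if_neg hb1]
      by_cases hb2 : n ≤ (seq.drop c).sum ∧ (seq.drop c).sum ≤ m
      · rw [if_pos hb2]
        rw [getD_set_self _ _ _ (by omega)]
        rw [hfc]
        simp only [segAux]
        rw [if_neg hb1, if_pos hb2]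
      rw [if_neg hb2]
      rw [getD_set_self _ _ _ (by omega)]
      -- else branch: relate A's loops to the window and the dp slots
      have hcL : c < seq.length := by
        rcases Nat.lt_or_ge c seq.length with h | h
        · exact h
        · exfalso
          have : seq.drop c = [] := List.drop_eq_nil_of_le h
          rw [this] at hb1; simp at hb1; omega
      -- lo ≥ c+1
      have hlo1 : winLo (buildPref seq 0) (PS seq c) n seq.length c
          = winLo (buildPref seq 0) (PS seq c) n seq.length (c+1) := by
        rw [winLo_step _ _ _ _ _ hcL, pref_getD seq c hc2, if_pos (by omega : PS seq c - PS seq c < n)]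
      have hlo_ge : c + 1 ≤ winLo (buildPref seq 0) (PS seq c) n seq.length c := by
        rw [hlo1]; exact winLo_ge _ _ _ _ _
      have hlo_le : winLo (buildPref seq 0) (PS seq c) n seq.length c ≤ seq.length := winLo_le _ _ _ _ _ hjL
      have hhi_ge : winLo (buildPref seq 0) (PS seq c) n seq.length c ≤ winHi (buildPref seq 0) (PS seq c) n m seq.length (winLo (buildPref seq 0) (PS seq c) n seq.length c) := winHi_ge _ _ _ _ _ _
      have hhi_le : winHi (buildPref seq 0) (PS seq c) n m seq.length (winLo (buildPref seq 0) (PS seq c) n seq.length c) ≤ seq.length := winHi_le _ _ _ _ _ _ hlo_le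
      -- A side
      rw [hfc]
      simp only [segAux]
      rw [if_neg hb1, if_neg hb2]
      have l1 := loop1_eq_winLo seq n c (seq.drop c) 0 (by omega) (by simp)
      simp only [Nat.add_zero, sub_self] at l1
      rw [l1]
      have hjlo : c + (winLo (buildPref seq 0) (PS seq c) n seq.length c - c) = winLo (buildPref seq 0) (PS seq c) n seq.length c := by omega
      have l2 := loop2_eq_winHi seq n m c (seq.drop (winLo (buildPref seq 0) (PS seq c) n seq.length c)) (winLo (buildPref seq 0) (PS seq c) n seq.length c - c) (by omega) (by rw [hjlo])
      rw [hjlo] at l2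
      rw [l2]
      rw [← List.map_reverse]
      rw [pop_eq_tryCands seq n m c (dpG seq n m (c+1)) (seq.length - c)
            ((List.range' (winLo (buildPref seq 0) (PS seq c) n seq.length c) (winHi (buildPref seq 0) (PS seq c) n m seq.length (winLo (buildPref seq 0) (PS seq c) n seq.length c) - (winLo (buildPref seq 0) (PS seq c) n seq.length c))).reverse) ?_]
      intro d hd
      have hd' : winLo (buildPref seq 0) (PS seq c) n seq.length c ≤ d ∧ d < winLo (buildPref seq 0) (PS seq c) n seq.length c + (winHi (buildPref seq 0) (PS seq c) n m seq.length (winLo (buildPref seq 0) (PS seq c) n seq.length c) - (winLo (buildPref seq 0) (PS seq c) n seq.length c)) := List.mem_range'_1.1 (List.mem_reverse.1 hd)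
      have hd2 : d < winHi (buildPref seq 0) (PS seq c) n m seq.length (winLo (buildPref seq 0) (PS seq c) n seq.length c) := by omega
      refine ⟨by omega, by omega, ?_⟩
      rw [ih (c+1) (by omega) d (by omega) (by omega)]
      exact (segAux_fuel n m hn (seq.length - d) (seq.drop d) (by simp)
        (seq.length - c) (seq.length - d + 1) (by simp only [List.length_drop]; omega)
        (by simp only [List.length_drop]; omega)).symm


theorem lemma_final : ∀ (seq : List Int) (n m : Int), Pre_segMaker seq n m →
    segMaker seq n m = segMaker_alt seq n m := by
  intro seq n m hpre
  rw [segMaker_alt_eq_dpG]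
  by_cases hn : 1 ≤ n
  · have h := dpG_inv seq n m hn (seq.length + 1) 0 (by omega) 0 (by omega) (by omega)
    rw [h]
    rfl
  · push_neg at hn
    have hn0 : n ≤ 0 := by omega
    have hbase0 : (buildPref seq 0).getD 0 0 = 0 := by
      rw [pref_getD seq 0 (by omega)]; simp [PS]
    have htot : (buildPref seq 0).getD seq.length 0 = seq.sum := by
      rw [pref_getD seq seq.length le_rfl]; simp [PS]
    have hLdp : (dpG seq n m (0+1)).length = seq.length + 1 :=
      dpG_length seq n m (seq.length + 1) (0+1) (by omega)
    rw [dpG_step seq n m 0 (by omega)]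
    unfold segMaker
    simp only [segAux]
    unfold dpStep
    simp only [hbase0, htot, sub_zero]
    by_cases hs1 : seq.sum < n
    · rw [if_pos hs1, if_pos hs1]
      exact (dpG_lo seq n m (seq.length + 1) 1 0 (by omega) (by omega)).symm
    rw [if_neg hs1, if_neg hs1]
    by_cases hs2 : n ≤ seq.sum ∧ seq.sum ≤ m
    · rw [if_pos hs2, if_pos hs2]
      exact (getD_set_self _ _ _ (by omega)).symm
    rw [if_neg hs2, if_neg hs2]
    have hm : m < 0 := by
      by_contra h
      have hge : n ≤ seq.sum := by omega
      have hlt : m < seq.sum := by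
        by_contra h2
        exact hs2 ⟨hge, by omega⟩
      exact hpre ⟨hn0, by omega, hlt⟩
    -- B side: empty candidate window
    have hlo : winLo (buildPref seq 0) 0 n seq.length 0 = 0 := by
      rcases Nat.eq_zero_or_pos seq.length with h | h
      · exact winLo_stop _ _ _ _ _ (by omega)
      · rw [winLo_step _ _ _ _ _ h, hbase0, if_neg (by omega)]
    have hhi : winHi (buildPref seq 0) 0 n m seq.length 0 = 0 := by
      rcases Nat.eq_zero_or_pos seq.length with h | h
      · exact winHi_stop _ _ _ _ _ _ (by omega)
      · rw [winHi_step _ _ _ _ _ _ h, hbase0, if_neg (by omega)]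
    rw [hlo, hhi]
    simp only [Nat.sub_zero, List.range'_zero, List.reverse_nil]
    rw [getD_set_self _ _ _ (by omega)]
    -- both sides none
    cases seq with
    | nil => simp [segLoop1, segLoop2, segPop, tryCands]
    | cons x rest =>
      simp only [segLoop1, if_neg (by omega : ¬ ((0:Int) < n))]
      simp only [segLoop2, if_neg (by push_neg; intro h; omega : ¬ (n ≤ (0:Int) ∧ (0:Int) ≤ m))]
      simp [segPop, tryCands]

-- ===== VERDICT (by name: the statement is the Claim_ definition above) =====
theorem segMaker_spec : Claim_equal_segMaker := by
  intro seq n m _ hpre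
  exact lemma_final seq n m hpre
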